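-- pv_equiv track=rewrite | github.com/UMBC-CMSC-Hamilton/cmsc201-fall22 | 12-12 Final Review/final_review_1pm.py | force_sort_nonrec
-- ===== SOURCE A (Python) =====
-- def force_sort_nonrec(a_list):
--     if not a_list:
--         return []
--     new_list = [a_list[0]]
--     previous = a_list[0]
--     for i in range(1, len(a_list)):
--         if a_list[i] >= previous:
--             new_list.append(a_list[i])
--             previous = a_list[i]
--
--     return new_list
-- ===== SOURCE B (Python) =====
-- def force_sort_nonrec(a_list):
--     # two passes: inclusive prefix maxima, then keep elements equal to their prefix max
--     running = []
--     m = None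
--     for x in a_list:
--         m = x if m is None or x > m else m
--         running.append(m)
--     return [x for x, m in zip(a_list, running) if x == m]
-- ===== Notes on version B (the rewrite author's own statement) =====
-- stated objective: alternative
-- what changed: Replaces the greedy keep-if-at-least-previous loop with a two-pass formulation: compute inclusive prefix maxima, then select the elements equal to their prefix max.
import Mathlib
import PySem

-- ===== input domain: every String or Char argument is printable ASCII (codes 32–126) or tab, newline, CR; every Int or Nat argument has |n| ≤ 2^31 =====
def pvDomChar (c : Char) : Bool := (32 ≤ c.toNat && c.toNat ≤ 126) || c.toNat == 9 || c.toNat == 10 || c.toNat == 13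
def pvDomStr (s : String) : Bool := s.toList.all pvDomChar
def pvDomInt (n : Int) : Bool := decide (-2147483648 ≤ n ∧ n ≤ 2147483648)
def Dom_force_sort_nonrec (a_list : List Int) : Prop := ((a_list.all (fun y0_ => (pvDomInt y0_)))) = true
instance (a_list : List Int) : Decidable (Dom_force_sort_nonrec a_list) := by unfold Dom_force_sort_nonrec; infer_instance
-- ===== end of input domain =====

-- B replaces A's greedy keep-if-at-least-previous loop by two passes: inclusive prefix maxima,
-- then keeping the elements equal to their prefix max (alternative decomposition, same cost).

-- ===== PORT A =====
def force_sort_nonrec (a_list : List Int) : List Int :=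
  if a_list = [] then []
  else
    let a0 := PySem.List.pyGetD a_list 0 0
    ((PySem.List.pyRange 1 a_list.length 1).foldl
      (fun (s : List Int × Int) i =>
        let x := PySem.List.pyGetD a_list i 0
        if x ≥ s.2 then (s.1 ++ [x], x) else s)
      ([a0], a0)).1

-- ===== PORT B =====
-- running prefix maxima continued from current max m (the loop building `running` in Source B)
def prefixMaxFrom (m : Int) : List Int → List Int
  | [] => []
  | x :: xs => (if x > m then x else m) :: prefixMaxFrom (if x > m then x else m) xs

-- inclusive prefix maxima of the whole list (m is None for the first element)
def prefixMax : List Int → List Int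
  | [] => []
  | x :: xs => x :: prefixMaxFrom x xs

def force_sort_nonrec_alt (a_list : List Int) : List Int :=
  ((a_list.zip (prefixMax a_list)).filter (fun p => p.1 = p.2)).map (fun p => p.1)

-- ===== PRECONDITION & SPEC =====
def Spec_force_sort_nonrec (a_list : List Int) (out : List Int) : Prop := out = force_sort_nonrec_alt a_list
instance (a_list : List Int) (out : List Int) : Decidable (Spec_force_sort_nonrec a_list out) := by unfold Spec_force_sort_nonrec; infer_instance

-- ===== CLAIM (what is proved, stated in full; the proofs are below) =====
def Claim_equal_force_sort_nonrec : Prop := ∀ (a_list : List Int), Dom_force_sort_nonrec a_list → Spec_force_sort_nonrec a_list (force_sort_nonrec a_list)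

-- ===== LEMMAS AND PROOFS =====

-- greedy selection as a structural recursion (characterisation of A's loop)
def greedy (prev : Int) : List Int → List Int
  | [] => []
  | x :: xs => if x ≥ prev then x :: greedy x xs else greedy prev xs

theorem foldl_greedy (xs : List Int) : ∀ (acc : List Int) (prev : Int),
    (xs.foldl (fun (s : List Int × Int) x => if x ≥ s.2 then (s.1 ++ [x], x) else s) (acc, prev)).1
      = acc ++ greedy prev xs := by
  induction xs with
  | nil => intro acc prev; simp [greedy]
  | cons x xs ih =>
    intro acc prev
    by_cases h : x ≥ prev
    · simp [greedy, h, List.foldl_cons, ih]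
    · simp [greedy, h, List.foldl_cons, ih]

theorem greedy_eq_filter (xs : List Int) : ∀ (prev : Int),
    greedy prev xs
      = ((xs.zip (prefixMaxFrom prev xs)).filter (fun p => p.1 = p.2)).map (fun p => p.1) := by
  induction xs with
  | nil => intro prev; simp [greedy, prefixMaxFrom]
  | cons x xs ih =>
    intro prev
    by_cases h : x ≥ prev
    · have hm : (if x > prev then x else prev) = x := by omega
      simp [greedy, prefixMaxFrom, h, hm, ih]
    · have hm : (if x > prev then x else prev) = prev := by omega
      have hne : ¬ (x = prev) := by omega
      simp [greedy, prefixMaxFrom, h, hm, hne, ih]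

-- ===== VERDICT (by name: the statement is the Claim_ definition above) =====
theorem force_sort_nonrec_spec : Claim_equal_force_sort_nonrec := by
  intro a_list _
  unfold Spec_force_sort_nonrec force_sort_nonrec force_sort_nonrec_alt
  cases a_list with
  | nil => simp [prefixMax]
  | cons a xs =>
    simp only [if_neg (List.cons_ne_nil a xs)]
    rw [PySem.List.foldl_pyRange_pyGetD' (xs := a :: xs) (d := 0)
        (f := fun (s : List Int × Int) x => if x ≥ s.2 then (s.1 ++ [x], x) else s)
        (init := ([PySem.List.pyGetD (a :: xs) 0 0], PySem.List.pyGetD (a :: xs) 0 0))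
        (a := 1) (by norm_num)]
    simp only [PySem.List.pyGetD, Int.toNat_one, List.drop_one, List.tail_cons]
    rw [foldl_greedy, greedy_eq_filter]
    simp [prefixMax]
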